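-- pv_equiv track=rewrite | github.com/Meteorych/AOIS | lab3/calculating_method.py | gluing_formula
-- ===== SOURCE A (Python) =====
-- def gluing_formula(begin_formula):
--     changed, glued_formula = [], []
--     for a in begin_formula[:-1]:
--         for b in begin_formula[begin_formula.index(a) + 1:]:
--             if abs(a.count("!") - b.count("!")) == 1 and step_of_gluing(a, b) is not None:
--                 glued_formula.append(step_of_gluing(a, b))
--             else:
--                 pass
--     return glued_formula
--
-- def step_of_gluing(element_1, element_2):
--     if element_1.find("+") != -1:
--         element_1, element_2 = element_1.split(" + "), element_2.split(" + ")
--     else: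
--         element_1, element_2 = element_1.split(" * "), element_2.split(" * ")
--     changed_elements = list(set(element_1) ^ set(element_2))
--     if len(changed_elements) != 2:
--         return None
--     if changed_elements[0] in element_1:
--         element_1.remove(changed_elements[0])
--     else:
--         element_1.remove(changed_elements[1])
--     return element_1
-- ===== SOURCE B (Python) =====
-- def _glue(a, b):
--     """Glue two terms if their literal sets differ by exactly one literal on each side."""
--     sep = " + " if "+" in a else " * "
--     lits1, lits2 = a.split(sep), b.split(sep)
--     only1 = [x for x in dict.fromkeys(lits1) if x not in lits2]
--     only2 = [x for x in dict.fromkeys(lits2) if x not in lits1]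
--     if len(only1) == 1 and len(only2) == 1:
--         out = list(lits1)
--         out.remove(only1[0])
--         return out
--     return None
--
--
-- def gluing_formula(begin_formula):
--     # Bucket the term indices by their '!'-count: a pair can glue only when the counts
--     # differ by exactly 1, so each outer term scans just the two adjacent buckets instead
--     # of the whole tail, and the per-pair count test and A's repeated list.index scan and
--     # double step_of_gluing call all disappear.
--     counts = [s.count("!") for s in begin_formula]
--     first = {}
--     for i, s in enumerate(begin_formula):
--         first.setdefault(s, i)
--     buckets = {}
--     for j, c in enumerate(counts):
--         buckets.setdefault(c, []).append(j)
--     glued_formula = []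
--     for a in begin_formula[:-1]:
--         j0 = first[a]
--         c = counts[j0]
--         for j in sorted(buckets.get(c - 1, []) + buckets.get(c + 1, [])):
--             if j > j0:
--                 g = _glue(a, begin_formula[j])
--                 if g is not None:
--                     glued_formula.append(g)
--     return glued_formula
-- ===== Notes on version B (the rewrite author's own statement) =====
-- stated objective: faster
-- what changed: B buckets term indices by '!'-count and, for each term, walks only the two adjacent buckets (merged via sorted) instead of scanning the whole tail with a per-pair count test, uses a first-occurrence index dict instead of A's per-element list.index scan, and computes the gluing step once per pair as two one-sided difference lists instead of A's symmetric difference plus conditional remove.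
-- outside the precondition, e.g. on gluing_formula(['!x * y * z', 'y']): A returns [['y', 'z']], B returns []
-- crash fix: On inputs containing a scanned pair whose second term's literal set has exactly two literals missing from the first term's (with '!'-counts differing by 1), A raises ValueError from list.remove; B skips the pair and returns the glueings of the remaining pairs. — e.g. on gluing_formula(["x", "x * !y * z"]): A raises ValueError, B returns []
import Mathlib
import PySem

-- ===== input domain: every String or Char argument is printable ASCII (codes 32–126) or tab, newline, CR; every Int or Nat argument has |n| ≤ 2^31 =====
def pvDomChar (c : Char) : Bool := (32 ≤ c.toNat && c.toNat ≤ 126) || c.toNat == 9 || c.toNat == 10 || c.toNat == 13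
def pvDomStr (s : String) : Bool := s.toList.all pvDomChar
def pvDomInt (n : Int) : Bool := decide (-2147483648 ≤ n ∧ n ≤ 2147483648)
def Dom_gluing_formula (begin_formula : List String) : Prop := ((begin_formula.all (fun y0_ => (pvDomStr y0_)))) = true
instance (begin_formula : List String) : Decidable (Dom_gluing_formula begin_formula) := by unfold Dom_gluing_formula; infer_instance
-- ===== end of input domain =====

-- B buckets term indices by '!'-count so each term scans only the two adjacent buckets instead
-- of the whole tail, replaces A's per-element list.index scan by a first-occurrence index built
-- once, and computes the gluing step once per pair as two one-sided difference lists instead of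
-- A's symmetric difference plus conditional remove.

-- ===== PORT A =====

-- str.split with a nonempty separator never fails: split? is some, getD is exact here
def pvSplit (s sep : String) : List String := (PySem.Str.split? s sep).getD []

-- A's step_of_gluing; `none` = Python's `return None`, and in the final branch `none` stands for
-- the ValueError `list.remove` raises when the element is absent (those inputs are outside Pre_)
def step_of_gluing (element_1 element_2 : String) : Option (List String) :=
  let sep := if PySem.Str.find element_1 "+" ≠ -1 then " + " else " * "
  let l1 := pvSplit element_1 sep
  let l2 := pvSplit element_2 sep
  let changed := PySem.Set.symmDiff (PySem.Set.ofList l1) (PySem.Set.ofList l2)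
  if changed.length ≠ 2 then none
  else if l1.contains changed[0]! then PySem.List.remove? l1 changed[0]!
  else PySem.List.remove? l1 changed[1]!

def gluing_formula (begin_formula : List String) : List (List String) :=
  (PySem.List.slice begin_formula none (some (-1))).foldl (fun acc a =>
    (PySem.List.slice begin_formula
        (some (((PySem.List.index? begin_formula a).getD 0 : Int) + 1)) none).foldl
      (fun acc b =>
        if ((PySem.Str.count a "!" : Int) - (PySem.Str.count b "!" : Int)).natAbs = 1 then
          match step_of_gluing a b with
          | some g => acc ++ [g]
          | none => acc
        else acc) acc) []

-- ===== PORT B =====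

def pvGlue (a b : String) : Option (List String) :=
  let sep := if PySem.Str.isIn "+" a then " + " else " * "
  let l1 := pvSplit a sep
  let l2 := pvSplit b sep
  let only1 := (PySem.List.dedup l1).filter (fun x => !(l2.contains x))
  let only2 := (PySem.List.dedup l2).filter (fun x => !(l1.contains x))
  if only1.length = 1 ∧ only2.length = 1 then PySem.List.remove? l1 only1[0]!
  else none

def pvFirstIdx (l : List String) : PySem.Dict String Int :=
  (PySem.List.enumerate l).foldl (fun d p => d.setdefault p.2 p.1) PySem.Dict.empty

-- buckets.setdefault(c, []).append(j) is Dict.modify with default []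
def pvBuckets (cs : List Int) : PySem.Dict Int (List Int) :=
  (PySem.List.enumerate cs).foldl (fun d p => d.modify p.2 [] (fun L => L ++ [p.1])) PySem.Dict.empty

def gluing_formula_alt (begin_formula : List String) : List (List String) :=
  let counts : List Int := begin_formula.map (fun s => (PySem.Str.count s "!" : Int))
  let first := pvFirstIdx begin_formula
  let buckets := pvBuckets counts
  (PySem.List.slice begin_formula none (some (-1))).foldl (fun acc a =>
    let j0 := first.getD a 0
    let c := PySem.List.pyGetD counts j0 0
    (PySem.List.sorted (buckets.getD (c - 1) [] ++ buckets.getD (c + 1) []) (fun j => j)).foldl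
      (fun acc j =>
        if j0 < j then
          match pvGlue a (PySem.List.pyGetD begin_formula j "") with
          | some g => acc ++ [g]
          | none => acc
        else acc) acc) []

-- ===== PRECONDITION & SPEC =====

-- a scanned pair is "bad" when the '!'-counts differ by 1 and the two terms' literal sets differ
-- in exactly two literals that do NOT fall one on each side: there A's result depends on Python's
-- set hash order (two literals only in the first term) or A raises ValueError (two only in the second)
def pvBadPair (a b : String) : Bool :=
  let sep := if PySem.Str.isIn "+" a then " + " else " * "
  let l1 := pvSplit a sep
  let l2 := pvSplit b sep
  let n1 := ((PySem.List.dedup l1).filter (fun x => !(l2.contains x))).length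
  let n2 := ((PySem.List.dedup l2).filter (fun x => !(l1.contains x))).length
  (((PySem.Str.count a "!" : Int) - (PySem.Str.count b "!" : Int)).natAbs == 1)
    && (n1 + n2 == 2) && !(n1 == 1)

-- Pre_ excludes inputs with a scanned bad pair: on those A either raises ValueError or returns a
-- value chosen by Python's set hash order, which no port can reproduce
def Pre_gluing_formula (begin_formula : List String) : Prop :=
  ∀ a ∈ begin_formula.dropLast,
    ∀ b ∈ begin_formula.drop ((PySem.List.index? begin_formula a).getD 0 + 1),
      pvBadPair a b = false

instance (begin_formula : List String) : Decidable (Pre_gluing_formula begin_formula) := by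
  unfold Pre_gluing_formula; infer_instance

def pvWitness_gluing_formula : List String := ["x * y", "x * !y", "z * y"]

-- On inputs with a scanned pair whose second term's literal set has exactly two literals missing
-- from the first term's (and '!'-counts differing by 1), A raises ValueError from list.remove;
-- B skips the pair and returns the glueings of the remaining pairs.
def pvRaisePair (a b : String) : Bool :=
  let sep := if PySem.Str.isIn "+" a then " + " else " * "
  let l1 := pvSplit a sep
  let l2 := pvSplit b sep
  let n1 := ((PySem.List.dedup l1).filter (fun x => !(l2.contains x))).length
  let n2 := ((PySem.List.dedup l2).filter (fun x => !(l1.contains x))).length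
  (((PySem.Str.count a "!" : Int) - (PySem.Str.count b "!" : Int)).natAbs == 1)
    && (n1 == 0) && (n2 == 2)

def Raises_gluing_formula (begin_formula : List String) : Prop :=
  ∃ a ∈ begin_formula.dropLast,
    ∃ b ∈ begin_formula.drop ((PySem.List.index? begin_formula a).getD 0 + 1),
      pvRaisePair a b = true

instance (begin_formula : List String) : Decidable (Raises_gluing_formula begin_formula) := by
  unfold Raises_gluing_formula; infer_instance

def pvRaiseWitness_gluing_formula : List String := ["x", "x * !y * z"]
def pvRaiseWitnessOut_gluing_formula : List (List String) := []

def Spec_gluing_formula (begin_formula : List String) (out : List (List String)) : Prop := out = gluing_formula_alt begin_formula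
instance (begin_formula : List String) (out : List (List String)) : Decidable (Spec_gluing_formula begin_formula out) := by unfold Spec_gluing_formula; infer_instance

-- ===== CLAIM (what is proved, stated in full; the proofs are below) =====
def Claim_equal_gluing_formula : Prop := ∀ (begin_formula : List String), Dom_gluing_formula begin_formula → Pre_gluing_formula begin_formula → Spec_gluing_formula begin_formula (gluing_formula begin_formula)

def Claim_raises_gluing_formula : Prop := (∀ (begin_formula : List String), Dom_gluing_formula begin_formula → Raises_gluing_formula begin_formula → ¬ Pre_gluing_formula begin_formula) ∧ (Dom_gluing_formula (pvRaiseWitness_gluing_formula) ∧ Raises_gluing_formula (pvRaiseWitness_gluing_formula) ∧ gluing_formula_alt (pvRaiseWitness_gluing_formula) = pvRaiseWitnessOut_gluing_formula)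

-- ===== LEMMAS AND PROOFS =====

lemma pv_sep_eq (a : String) {α : Type} (x y : α) :
    (if PySem.Str.find a "+" ≠ -1 then x else y) = (if PySem.Str.isIn "+" a then x else y) := by
  by_cases h : ("+" : String).toList <:+: a.toList
  · rw [if_pos ((PySem.Str.find_ne_neg_one_iff _ _).mpr h), if_pos ((PySem.Str.isIn_iff_infix _ _).mpr h)]
  · rw [if_neg (fun hc => h ((PySem.Str.find_ne_neg_one_iff _ _).mp hc)),
        if_neg (fun hc => h ((PySem.Str.isIn_iff_infix _ _).mp hc))]

-- list(set(l1) ^ set(l2)) in A's port, written as B computes it: the two one-sided differences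
lemma pv_symmDiff_filter (l1 l2 : List String) :
    PySem.Set.symmDiff (PySem.Set.ofList l1) (PySem.Set.ofList l2)
      = (PySem.List.dedup l1).filter (fun x => !(l2.contains x))
        ++ (PySem.List.dedup l2).filter (fun x => !(l1.contains x)) := by
  show PySem.Set.diff _ _ ++ PySem.Set.diff _ _ = _
  rw [PySem.List.dedup_eq_ofList, PySem.List.dedup_eq_ofList]
  show (PySem.Set.ofList l1).filter _ ++ (PySem.Set.ofList l2).filter _ = _
  congr 1
  · apply List.filter_congr; intro x hx
    cases h : l2.contains x <;> simp_all [PySem.Set.contains_eq_listContains, PySem.Set.mem_ofList]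
  · apply List.filter_congr; intro x hx
    cases h : l1.contains x <;> simp_all [PySem.Set.contains_eq_listContains, PySem.Set.mem_ofList]

-- on a non-bad pair with '!'-counts differing by 1, A's step and B's glue agree
lemma pv_step_eq_glue (a b : String) (hbad : pvBadPair a b = false)
    (hcnt : ((PySem.Str.count a "!" : Int) - (PySem.Str.count b "!" : Int)).natAbs = 1) :
    step_of_gluing a b = pvGlue a b := by
  simp only [step_of_gluing, pvGlue, pvBadPair] at hbad ⊢
  rw [pv_sep_eq]
  set sep := if PySem.Str.isIn "+" a then " + " else " * " with hsep
  set l1 := pvSplit a sep with hl1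
  set l2 := pvSplit b sep with hl2
  set d1 := (PySem.List.dedup l1).filter (fun x => !(l2.contains x)) with hd1
  set d2 := (PySem.List.dedup l2).filter (fun x => !(l1.contains x)) with hd2
  rw [pv_symmDiff_filter]
  rw [← hd1, ← hd2]
  simp only [Bool.and_eq_false_iff, beq_iff_eq, Bool.not_eq_false', beq_eq_false_iff_ne] at hbad
  by_cases hsum : (d1 ++ d2).length = 2
  · rw [List.length_append] at hsum
    have h1 : d1.length = 1 := by
      rcases hbad with (h | h) | h
      · exact absurd hcnt h
      · omega
      · exact h
    have h2 : d2.length = 1 := by omega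
    obtain ⟨x, hx⟩ := List.length_eq_one_iff.mp h1
    obtain ⟨y, hy⟩ := List.length_eq_one_iff.mp h2
    rw [hx, hy]
    have hxl1 : l1.contains x = true := by
      have hxm : x ∈ (PySem.List.dedup l1).filter (fun x => !(l2.contains x)) := by
        rw [← hd1, hx]; simp
      have := List.mem_of_mem_filter hxm
      rw [PySem.List.dedup_eq_ofList, PySem.Set.mem_ofList] at this
      exact List.elem_eq_true_of_mem this
    have hxm1 : x ∈ l1 := by simpa using hxl1
    simp [hxm1]
  · rw [if_pos (by rw [List.length_append] at hsum ⊢; omega)]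
    rw [List.length_append] at hsum
    rw [if_neg (show ¬(d1.length = 1 ∧ d2.length = 1) by omega)]

lemma pvFirstIdx_append (l : List String) (x : String) :
    pvFirstIdx (l ++ [x]) = (pvFirstIdx l).setdefault x l.length := by
  unfold pvFirstIdx
  rw [PySem.List.enumerate_append, List.foldl_append]
  simp [PySem.List.enumerate]

lemma pvFirstIdx_contains (l : List String) (x : String) :
    (pvFirstIdx l).contains x = l.contains x := by
  induction l using List.reverseRecOn with
  | nil => simp [pvFirstIdx, PySem.List.enumerate]
  | append_singleton l y ih =>
      rw [pvFirstIdx_append, PySem.Dict.contains_setdefault, ih]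
      cases h : x == y <;> simp_all

-- B's first-occurrence dict looks up what A's list.index scans for
lemma pvFirstIdx_getD (l : List String) (a : String) (ha : a ∈ l) :
    (pvFirstIdx l).getD a 0 = ((PySem.List.index? l a).getD 0 : Int) := by
  induction l using List.reverseRecOn with
  | nil => simp at ha
  | append_singleton l y ih =>
      rw [pvFirstIdx_append]
      by_cases hal : a ∈ l
      · rw [PySem.List.index?_append_of_mem _ hal]
        by_cases hay : a = y
        · subst hay
          rw [PySem.Dict.getD_setdefault_self]
          have hc : (pvFirstIdx l).contains a = true := by
            rw [pvFirstIdx_contains]; exact List.elem_eq_true_of_mem hal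
          have hs : ((pvFirstIdx l).get? a).isSome = true := by
            rw [← PySem.Dict.contains_eq_isSome_get?]; exact hc
          obtain ⟨w, hw⟩ := Option.isSome_iff_exists.mp hs
          rw [PySem.Dict.getD_of_get?_eq_some _ _ hw, ← PySem.Dict.getD_of_get?_eq_some _ _ hw, ih hal]
        · rw [PySem.Dict.getD_eq_get?_getD, PySem.Dict.get?_setdefault_of_ne _ _ hay,
              ← PySem.Dict.getD_eq_get?_getD, ih hal]
      · have hay : a = y := by
          rcases List.mem_append.mp ha with h | h
          · exact absurd h hal
          · simpa using h
        subst hay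
        rw [PySem.List.index?_append_singleton_self _ _ hal]
        have hc : (pvFirstIdx l).contains a = false := by
          rw [pvFirstIdx_contains]
          simpa using hal
        rw [PySem.Dict.setdefault_of_not_contains _ _ hc, PySem.Dict.getD_insert_self]
        simp


lemma pvBuckets_append (cs : List Int) (c : Int) :
    pvBuckets (cs ++ [c]) = (pvBuckets cs).modify c [] (fun L => L ++ [(cs.length : Int)]) := by
  unfold pvBuckets
  rw [PySem.List.enumerate_append, List.foldl_append]
  simp [PySem.List.enumerate]

lemma pvBuckets_getD (cs : List Int) (k : Int) :
    (pvBuckets cs).getD k [] = ((PySem.List.enumerate cs).filter (fun p => p.2 == k)).map (·.1) := by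
  induction cs using List.reverseRecOn with
  | nil => simp [pvBuckets, PySem.List.enumerate]
  | append_singleton cs c ih =>
      rw [pvBuckets_append, PySem.Dict.getD_modify, PySem.List.enumerate_append]
      simp only [List.filter_append, List.map_append, ih]
      by_cases hk : k = c
      · subst hk; simp [PySem.List.enumerate, ih]
      · simp [PySem.List.enumerate, hk, Ne.symm hk]

lemma mem_bucket_iff (cs : List Int) (k j : Int) :
    j ∈ (pvBuckets cs).getD k []
      ↔ ∃ i : Nat, ∃ _ : i < cs.length, j = (i : Int) ∧ cs[i] = k := by
  rw [pvBuckets_getD]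
  simp only [List.mem_map, List.mem_filter, beq_iff_eq]
  constructor
  · rintro ⟨p, ⟨hp, hpk⟩, hpj⟩
    obtain ⟨i, hi, rfl⟩ := (PySem.List.mem_enumerate_iff _ _ _).mp hp
    exact ⟨i, hi, by simpa using hpj.symm, by simpa using hpk⟩
  · rintro ⟨i, hi, rfl, hk⟩
    exact ⟨((i : Int), cs[i]), ⟨(PySem.List.mem_enumerate_iff _ _ _).mpr ⟨i, hi, by simp⟩, hk⟩, rfl⟩

lemma bucket_pairwise (cs : List Int) (k : Int) :
    ((pvBuckets cs).getD k []).Pairwise (· < ·) := by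
  rw [pvBuckets_getD]
  exact List.pairwise_map.mpr ((PySem.List.pairwise_lt_enumerate cs 0).filter _)

lemma pyRange_pairwise (n : Nat) :
    (PySem.List.pyRange 0 (n : Int)).Pairwise (· < ·) := by
  rw [PySem.List.pyRange_of_pos _ _ (by norm_num : (0:Int) < 1)]
  refine List.pairwise_map.mpr ?_
  exact (List.pairwise_lt_range).imp (by intro a b h; omega)

lemma pv_candidates (cs : List Int) (c : Int) :
    PySem.List.sorted ((pvBuckets cs).getD (c - 1) [] ++ (pvBuckets cs).getD (c + 1) []) (fun j => j)
      = (PySem.List.pyRange 0 (cs.length : Int)).filter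
          (fun j => PySem.List.pyGetD cs j 0 == c - 1 || PySem.List.pyGetD cs j 0 == c + 1) := by
  apply PySem.List.sorted_eq_of_perm_of_pairwise_lt
  · rw [List.perm_ext_iff_of_nodup]
    · intro j
      simp only [List.mem_filter, List.mem_append, mem_bucket_iff, Bool.or_eq_true, beq_iff_eq,
        PySem.List.mem_pyRange_iff_of_pos (show (0:Int) < 1 by norm_num)]
      constructor
      · rintro ⟨⟨h0, hn, -⟩, hP⟩
        lift j to Nat using h0 with i
        have hi : i < cs.length := by exact_mod_cast hn
        rw [PySem.List.pyGetD_natCast, List.getD_eq_getElem _ _ hi] at hP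
        rcases hP with h | h
        · exact Or.inl ⟨i, hi, rfl, h⟩
        · exact Or.inr ⟨i, hi, rfl, h⟩
      · rintro (⟨i, hi, rfl, h1⟩ | ⟨i, hi, rfl, h1⟩)
        · exact ⟨⟨by positivity, by exact_mod_cast hi, one_dvd _⟩,
            Or.inl (by rw [PySem.List.pyGetD_natCast, List.getD_eq_getElem _ _ hi]; exact h1)⟩
        · exact ⟨⟨by positivity, by exact_mod_cast hi, one_dvd _⟩,
            Or.inr (by rw [PySem.List.pyGetD_natCast, List.getD_eq_getElem _ _ hi]; exact h1)⟩
    · exact ((pyRange_pairwise _).filter _).imp (fun h => ne_of_lt h)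
    · rw [List.nodup_append]
      refine ⟨(bucket_pairwise _ _).imp (fun h => ne_of_lt h),
        (bucket_pairwise _ _).imp (fun h => ne_of_lt h), ?_⟩
      intro j hj j' hj' rfl
      obtain ⟨i, hi, rfl, h1⟩ := (mem_bucket_iff _ _ _).mp hj
      obtain ⟨i', hi', hii, h2⟩ := (mem_bucket_iff _ _ _).mp hj'
      have : i = i' := by exact_mod_cast hii
      subst this; omega
  · exact (pyRange_pairwise _).filter _

-- per outer element: A's filtered scan of the tail equals B's walk over the two adjacent buckets
lemma pv_inner_eq (l : List String) (a : String) (k : Nat)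
    (hk : k < l.length) (hlk : l[k] = a)
    (hpre : ∀ b ∈ l.drop (k + 1), pvBadPair a b = false)
    (acc : List (List String)) :
    (l.drop (k + 1)).foldl
      (fun acc b =>
        if ((PySem.Str.count a "!" : Int) - (PySem.Str.count b "!" : Int)).natAbs = 1 then
          match step_of_gluing a b with
          | some g => acc ++ [g]
          | none => acc
        else acc) acc
    = (PySem.List.sorted
        ((pvBuckets (l.map (fun s => (PySem.Str.count s "!" : Int)))).getD
            (PySem.List.pyGetD (l.map (fun s => (PySem.Str.count s "!" : Int))) (k : Int) 0 - 1) []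
          ++ (pvBuckets (l.map (fun s => (PySem.Str.count s "!" : Int)))).getD
            (PySem.List.pyGetD (l.map (fun s => (PySem.Str.count s "!" : Int))) (k : Int) 0 + 1) [])
        (fun j => j)).foldl
      (fun acc j =>
        if (k : Int) < j then
          match pvGlue a (PySem.List.pyGetD l j "") with
          | some g => acc ++ [g]
          | none => acc
        else acc) acc := by
  set cs := l.map (fun s => (PySem.Str.count s "!" : Int)) with hcs
  have hlen : cs.length = l.length := List.length_map _
  have hc : PySem.List.pyGetD cs (k : Int) 0 = (PySem.Str.count a "!" : Int) := by
    rw [PySem.List.pyGetD_natCast, List.getD_eq_getElem _ _ (by omega : k < cs.length)]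
    simp [hcs, hlk]
  rw [hc, pv_candidates, hlen]
  rw [List.foldl_filter]
  rw [PySem.List.pyRange_one_append 0 ((k:Int) + 1) (l.length : Int) (by omega) (by exact_mod_cast hk),
      List.foldl_append]
  -- the low half contributes nothing: every index there is ≤ k
  have hlow : ∀ (acc₀ : List (List String)),
      (PySem.List.pyRange 0 ((k:Int) + 1)).foldl
        (fun acc j =>
          if (PySem.List.pyGetD cs j 0 == (PySem.Str.count a "!" : Int) - 1
              || PySem.List.pyGetD cs j 0 == (PySem.Str.count a "!" : Int) + 1) then
            (if (k : Int) < j then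
              match pvGlue a (PySem.List.pyGetD l j "") with
              | some g => acc ++ [g]
              | none => acc
            else acc)
          else acc) acc₀ = acc₀ := by
    intro acc₀
    rw [PySem.List.foldl_congr_mem _ _ (fun acc _ => acc) _ ?_, List.foldl_fixed]
    intro acc' j hj
    have hj' := (PySem.List.mem_pyRange_iff_of_pos (by norm_num) j).mp hj
    have : ¬ ((k : Int) < j) := by omega
    simp [this]
  rw [hlow]
  -- the high half is exactly A's scan of the tail
  have hrange : PySem.List.pyRange ((k:Int) + 1) (l.length : Int)
      = PySem.List.pyRange (((k + 1 : Nat)) : Int) (PySem.List.len l) := by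
    norm_num [PySem.List.len]
  rw [hrange]
  have hcongr : ∀ (acc₀ : List (List String)),
      (PySem.List.pyRange (((k + 1 : Nat)) : Int) (PySem.List.len l)).foldl
        (fun acc j =>
          if (PySem.List.pyGetD cs j 0 == (PySem.Str.count a "!" : Int) - 1
              || PySem.List.pyGetD cs j 0 == (PySem.Str.count a "!" : Int) + 1) then
            (if (k : Int) < j then
              match pvGlue a (PySem.List.pyGetD l j "") with
              | some g => acc ++ [g]
              | none => acc
            else acc)
          else acc) acc₀
      = (PySem.List.pyRange (((k + 1 : Nat)) : Int) (PySem.List.len l)).foldl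
        (fun acc j =>
          (fun acc b =>
            if ((PySem.Str.count a "!" : Int) - (PySem.Str.count b "!" : Int)).natAbs = 1 then
              match step_of_gluing a b with
              | some g => acc ++ [g]
              | none => acc
            else acc) acc (PySem.List.pyGetD l j "")) acc₀ := by
    intro acc₀
    apply PySem.List.foldl_congr_mem
    intro acc' j hj
    have hj' := (PySem.List.mem_pyRange_iff_of_pos (by norm_num) j).mp hj
    have hlen2 : PySem.List.len l = (l.length : Int) := rfl
    rw [hlen2] at hj'
    obtain ⟨h1, h2, -⟩ := hj'
    lift j to Nat using (by omega) with i
    have hi : i < l.length := by exact_mod_cast h2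
    have hik : k < i := by exact_mod_cast (by omega : ((k : Int) + 1) ≤ i)
    have hb : PySem.List.pyGetD l (i : Int) "" = l[i] := by
      rw [PySem.List.pyGetD_natCast, List.getD_eq_getElem _ _ hi]
    have hcnt : PySem.List.pyGetD cs (i : Int) 0 = (PySem.Str.count l[i] "!" : Int) := by
      rw [PySem.List.pyGetD_natCast, List.getD_eq_getElem _ _ (by omega : i < cs.length)]
      simp [hcs]
    rw [hb, hcnt]
    have hmem : l[i] ∈ l.drop (k + 1) := by
      rw [List.mem_iff_getElem]
      refine ⟨i - (k + 1), by simp [List.length_drop]; omega, ?_⟩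
      rw [List.getElem_drop]
      congr 1
      omega
    by_cases hg : ((PySem.Str.count a "!" : Int) - (PySem.Str.count l[i] "!" : Int)).natAbs = 1
    · have hP : ((PySem.Str.count l[i] "!" : Int) == (PySem.Str.count a "!" : Int) - 1
          || (PySem.Str.count l[i] "!" : Int) == (PySem.Str.count a "!" : Int) + 1) = true := by
        simp only [Bool.or_eq_true, beq_iff_eq]
        omega
      rw [hP, if_pos rfl, if_pos (by exact_mod_cast hik), if_pos hg,
          pv_step_eq_glue a l[i] (hpre _ hmem) hg]
    · have hP : ((PySem.Str.count l[i] "!" : Int) == (PySem.Str.count a "!" : Int) - 1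
          || (PySem.Str.count l[i] "!" : Int) == (PySem.Str.count a "!" : Int) + 1) = false := by
        simp only [Bool.or_eq_false_iff, beq_eq_false_iff_ne]
        omega
      rw [hP, if_neg hg, if_neg (by simp)]
  rw [hcongr]
  exact (PySem.List.foldl_pyRange_pyGetD l "" _ acc (Int.natCast_nonneg _)).symm

theorem gluing_formula_spec : Claim_equal_gluing_formula := by
  intro l _ hpre
  unfold Spec_gluing_formula gluing_formula gluing_formula_alt
  simp only [PySem.List.slice_to_neg_one]
  apply PySem.List.foldl_congr_mem
  intro acc a ha
  have hal : a ∈ l := List.mem_of_mem_dropLast ha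
  obtain ⟨m, hm⟩ := Option.isSome_iff_exists.mp ((PySem.List.index?_isSome_iff l a).mpr hal)
  obtain ⟨hk, hlk, -⟩ := PySem.List.getElem_of_index?_eq_some hm
  have hpre' := hpre a ha
  rw [pvFirstIdx_getD l a hal]
  simp only [hm, Option.getD_some] at hpre' ⊢
  have hsl : PySem.List.slice l (some ((m : Int) + 1)) none = l.drop (m + 1) := by
    rw [show ((m : Int) + 1) = ((m + 1 : Nat) : Int) by push_cast; ring]
    exact PySem.List.slice_from_natCast _ _
  rw [hsl]
  exact pv_inner_eq l a m hk hlk hpre' acc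

theorem gluing_formula_raises : Claim_raises_gluing_formula := by
  unfold Claim_raises_gluing_formula
  constructor
  · intro l _ hr hpre
    obtain ⟨a, ha, b, hb, hrp⟩ := hr
    have hbad := hpre a ha b hb
    simp only [pvRaisePair, Bool.and_eq_true, beq_iff_eq] at hrp
    simp only [pvBadPair, Bool.and_eq_false_iff, beq_iff_eq, Bool.not_eq_false',
      beq_eq_false_iff_ne] at hbad
    rcases hbad with (h | h) | h <;> omega
  · decide

-- self-check: the raise witness itself falls outside Pre_ (corollary of the claim just proved)
theorem pv_raise_witness_ok : ¬ Pre_gluing_formula pvRaiseWitness_gluing_formula :=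
  gluing_formula_raises.1 pvRaiseWitness_gluing_formula (by decide) gluing_formula_raises.2.2.1
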